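-- pv_equiv track=rewrite | github.com/PeterGeers/h-dcn | backend/test_frontend_backend_integration.py | _get_frontend_error_type
-- ===== SOURCE A (Python) =====
-- from typing import Dict, List, Tuple, Any
--
-- def _get_frontend_error_type(user_roles: List[str]) -> str:
--     """
--     Simulate frontend error type detection
--     """
--     has_permission = any(role in ["Members_CRUD", "Members_Read", "Members_Export"] for role in user_roles)
--     has_region = any(role.startswith("Regio_") for role in user_roles)
--
--     if has_permission and not has_region:
--         return "missing_region"
--     elif has_region and not has_permission:
--         return "missing_permission"
--     elif not has_permission and not has_region:
--         return "insufficient_permission"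
--     else:
--         return "no_error"
-- ===== SOURCE B (Python) =====
-- _PERMS = frozenset(("Members_CRUD", "Members_Read", "Members_Export"))
-- _TABLE = ["insufficient_permission", "missing_region", "missing_permission", "no_error"]
--
--
-- def _get_frontend_error_type(user_roles):
--     """
--     Simulate frontend error type detection
--     """
--     code = 0
--     for role in user_roles:
--         code |= (role in _PERMS) | 2 * role.startswith("Regio_")
--         if code == 3:
--             break
--     return _TABLE[code]
-- ===== Notes on version B (the rewrite author's own statement) =====
-- stated objective: alternative
-- what changed: B encodes each role as a 2-bit mask (bit 0: permission role, bit 1: Regio_ prefix), bitwise-ORs the masks in one pass with an early exit once the mask saturates at 3, and returns by positional indexing into a 4-entry table, instead of two any() scans feeding an if/elif cascade.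
import Mathlib
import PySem

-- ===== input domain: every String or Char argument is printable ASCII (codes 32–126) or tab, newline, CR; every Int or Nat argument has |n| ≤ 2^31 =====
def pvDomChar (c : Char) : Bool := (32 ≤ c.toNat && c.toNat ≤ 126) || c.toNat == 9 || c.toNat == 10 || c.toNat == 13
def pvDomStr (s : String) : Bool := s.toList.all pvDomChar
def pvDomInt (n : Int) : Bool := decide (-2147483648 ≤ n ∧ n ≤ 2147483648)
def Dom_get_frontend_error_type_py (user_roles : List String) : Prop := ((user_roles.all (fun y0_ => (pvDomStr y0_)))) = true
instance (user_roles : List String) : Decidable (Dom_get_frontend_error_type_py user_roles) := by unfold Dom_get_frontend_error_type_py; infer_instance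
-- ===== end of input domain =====

-- B folds a per-role 2-bit mask with bitwise OR (early exit at saturation) and indexes a positional table, instead of two any() scans and an if/elif cascade (alternative decomposition, same cost).


-- ===== PORT A =====
def get_frontend_error_type_py (user_roles : List String) : String :=
  let has_permission := user_roles.any (fun role => ["Members_CRUD", "Members_Read", "Members_Export"].contains role)
  let has_region := user_roles.any (fun role => PySem.Str.startswith role "Regio_")
  if has_permission && !has_region then "missing_region"
  else if has_region && !has_permission then "missing_permission"
  else if !has_permission && !has_region then "insufficient_permission"
  else "no_error"

-- ===== PORT B =====
def pvPerms : List String := ["Members_CRUD", "Members_Read", "Members_Export"]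
def pvTable : List String := ["insufficient_permission", "missing_region", "missing_permission", "no_error"]

-- Source B's for-loop with early break, as structural recursion; Python's `|` on ints is Int.lor (exact)
def pvGo : Int → List String → Int
  | code, [] => code
  | code, role :: rest =>
      let code := Int.lor code (Int.lor (if pvPerms.contains role then 1 else 0)
                                        (2 * (if PySem.Str.startswith role "Regio_" then 1 else 0)))
      if code == 3 then code else pvGo code rest

def get_frontend_error_type_py_alt (user_roles : List String) : String :=
  (PySem.List.pyGet? pvTable (pvGo 0 user_roles)).getD ""

-- ===== PRECONDITION & SPEC =====
def Spec_get_frontend_error_type_py (user_roles : List String) (out : String) : Prop := out = get_frontend_error_type_py_alt user_roles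
instance (user_roles : List String) (out : String) : Decidable (Spec_get_frontend_error_type_py user_roles out) := by unfold Spec_get_frontend_error_type_py; infer_instance

-- ===== CLAIM (what is proved, stated in full; the proofs are below) =====
def Claim_equal_get_frontend_error_type_py : Prop := ∀ (user_roles : List String), Dom_get_frontend_error_type_py user_roles → Spec_get_frontend_error_type_py user_roles (get_frontend_error_type_py user_roles)

-- ===== LEMMAS AND PROOFS =====
-- 2-bit encoding of the (permission, region) flag pair
def pvEnc (hp hr : Bool) : Int := Int.lor (if hp then 1 else 0) (2 * (if hr then 1 else 0))

theorem pvEnc_or (hp hr p r : Bool) :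
    Int.lor (pvEnc hp hr) (Int.lor (if p then 1 else 0) (2 * (if r then 1 else 0)))
      = pvEnc (hp || p) (hr || r) := by
  cases hp <;> cases hr <;> cases p <;> cases r <;> decide

theorem pvEnc_eq3 (hp hr : Bool) : (pvEnc hp hr == 3) = (hp && hr) := by
  cases hp <;> cases hr <;> decide

theorem pvGo_enc (l : List String) (hp hr : Bool) :
    pvGo (pvEnc hp hr) l
      = pvEnc (hp || l.any (fun role => pvPerms.contains role))
              (hr || l.any (fun role => PySem.Str.startswith role "Regio_")) := by
  induction l generalizing hp hr with
  | nil => simp [pvGo]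
  | cons x xs ih =>
    simp only [pvGo, List.any_cons]
    rw [pvEnc_or, pvEnc_eq3, ih]
    cases h1 : (hp || pvPerms.contains x) <;> cases h2 : (hr || PySem.Str.startswith x "Regio_") <;>
      simp only [← Bool.or_assoc, h1, h2, Bool.true_or, Bool.false_or] <;> simp

theorem pvTable_lookup (hp hr : Bool) :
    (PySem.List.pyGet? pvTable (pvEnc hp hr)).getD ""
      = (if hp && !hr then "missing_region"
         else if hr && !hp then "missing_permission"
         else if !hp && !hr then "insufficient_permission"
         else "no_error") := by
  cases hp <;> cases hr <;> decide

-- ===== VERDICT (by name: the statement is the Claim_ definition above) =====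
theorem get_frontend_error_type_py_spec : Claim_equal_get_frontend_error_type_py := by
  intro user_roles _
  unfold Spec_get_frontend_error_type_py get_frontend_error_type_py get_frontend_error_type_py_alt
  have h0 : (0 : Int) = pvEnc false false := by decide
  rw [h0, pvGo_enc, pvTable_lookup]
  rfl
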